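-- pv_equiv track=rewrite | github.com/joningi98/SC-T-111-PROG | tima_verkefni/Assignment_16_Top_100_Chess_players/part2.py | get_points_per_country
-- ===== SOURCE A (Python) =====
-- def get_points_per_country(chess_players_dict):
--     country_dict = {}
--     for chess_players_dict in chess_players_dict.items():
--         country = chess_players_dict[1][1]
--         if country in country_dict:
--             country_dict[country][0] += 1
--             country_dict[country][1] += chess_players_dict[1][2]
--         else:
--             data = [1, chess_players_dict[1][2]]
--             country_dict[country] = data
--     return country_dict
-- ===== SOURCE B (Python) =====
-- def get_points_per_country(chess_players_dict):
--     groups = {}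
--     for name, country, points in chess_players_dict.values():
--         groups.setdefault(country, []).append(points)
--     return {c: [len(ps), sum(ps)] for c, ps in groups.items()}
-- ===== Notes on version B (the rewrite author's own statement) =====
-- stated objective: alternative
-- what changed: A maintains a running [count, sum] pair per country with in-place element updates behind a membership test; B first groups the raw point values into per-country lists in one pass, then builds each entry as [len(group), sum(group)] in a second aggregation pass.
import Mathlib
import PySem

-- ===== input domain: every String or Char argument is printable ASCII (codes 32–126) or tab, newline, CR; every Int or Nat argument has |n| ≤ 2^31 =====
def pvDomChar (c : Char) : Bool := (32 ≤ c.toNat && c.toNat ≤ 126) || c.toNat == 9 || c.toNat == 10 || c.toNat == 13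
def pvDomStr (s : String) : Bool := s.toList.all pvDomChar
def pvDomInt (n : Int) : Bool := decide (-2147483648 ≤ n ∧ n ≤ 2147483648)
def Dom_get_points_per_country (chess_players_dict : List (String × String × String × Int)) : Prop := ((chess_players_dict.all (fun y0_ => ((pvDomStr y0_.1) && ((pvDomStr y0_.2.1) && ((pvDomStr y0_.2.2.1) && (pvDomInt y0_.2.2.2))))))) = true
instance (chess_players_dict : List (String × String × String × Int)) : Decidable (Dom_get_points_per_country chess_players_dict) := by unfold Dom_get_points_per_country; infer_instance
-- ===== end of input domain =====

-- B changes the decomposition: it groups the raw point values into per-country lists in one pass,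
-- then aggregates each group to [len, sum] in a second pass, instead of A's in-place running updates.

-- ===== PORT A =====
-- one loop step of A's 'for … in chess_players_dict.items()' body
def pvStepA (cd : PySem.Dict String (List Int)) (item : String × String × String × Int) :
    PySem.Dict String (List Int) :=
  let country := item.2.2.1
  if cd.contains country then
    -- country_dict[country][0] += 1 ; country_dict[country][1] += item[1][2]  (in-place list writes)
    let v := cd.getD country []
    let v := PySem.List.pySetD v 0 (PySem.List.pyGetD v 0 0 + 1)
    let v := PySem.List.pySetD v 1 (PySem.List.pyGetD v 1 0 + item.2.2.2)
    cd.insert country v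
  else
    cd.insert country [1, item.2.2.2]

def get_points_per_country (chess_players_dict : List (String × String × String × Int)) : List (String × List Int) :=
  (chess_players_dict.foldl pvStepA PySem.Dict.empty).items

-- ===== PORT B =====
def get_points_per_country_alt (chess_players_dict : List (String × String × String × Int)) : List (String × List Int) :=
  -- groups.setdefault(country, []).append(points)  ==  groups[country] = groups.get(country, []) + [points]
  ((chess_players_dict.foldl
      (fun d x => d.modify x.2.2.1 [] (· ++ [x.2.2.2]))
      (PySem.Dict.empty : PySem.Dict String (List Int))).items).map
    (fun p => (p.1, [(p.2.length : Int), p.2.sum]))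

-- ===== PRECONDITION & SPEC =====
def Spec_get_points_per_country (chess_players_dict : List (String × String × String × Int)) (out : List (String × List Int)) : Prop := out = get_points_per_country_alt chess_players_dict
instance (chess_players_dict : List (String × String × String × Int)) (out : List (String × List Int)) : Decidable (Spec_get_points_per_country chess_players_dict out) := by unfold Spec_get_points_per_country; infer_instance

-- ===== CLAIM (what is proved, stated in full; the proofs are below) =====
def Claim_equal_get_points_per_country : Prop := ∀ (chess_players_dict : List (String × String × String × Int)), Dom_get_points_per_country chess_players_dict → Spec_get_points_per_country chess_players_dict (get_points_per_country chess_players_dict)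

-- ===== LEMMAS AND PROOFS =====

-- the value A's step stores at the item's country key
def pvValA (cd : PySem.Dict String (List Int)) (x : String × String × String × Int) : List Int :=
  if cd.contains x.2.2.1 then
    let v := cd.getD x.2.2.1 []
    let v := PySem.List.pySetD v 0 (PySem.List.pyGetD v 0 0 + 1)
    PySem.List.pySetD v 1 (PySem.List.pyGetD v 1 0 + x.2.2.2)
  else [1, x.2.2.2]

-- A's step always inserts at the item's country key (both branches do)
lemma pvStepA_eq_insert (cd : PySem.Dict String (List Int)) (x : String × String × String × Int) :
    pvStepA cd x = cd.insert x.2.2.1 (pvValA cd x) := by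
  unfold pvStepA pvValA
  by_cases h : cd.contains x.2.2.1 <;> simp [h]

lemma pvStepA_funext : pvStepA = fun cd x => cd.insert x.2.2.1 (pvValA cd x) :=
  funext fun cd => funext fun x => pvStepA_eq_insert cd x

lemma pvLoopA_get?_some (l : List (String × String × String × Int))
    (cd : PySem.Dict String (List Int)) (c : String) (a b : Int)
    (h : cd.get? c = some [a, b]) :
    (l.foldl pvStepA cd).get? c =
      some [a + ((l.filter (fun x => x.2.2.1 == c)).length : Int),
            b + ((l.filter (fun x => x.2.2.1 == c)).map (·.2.2.2)).sum] := by
  induction l generalizing cd a b with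
  | nil => simpa using h
  | cons x t ih =>
    by_cases hk : x.2.2.1 = c
    · have hc : cd.contains c = true := by
        simp [PySem.Dict.contains_eq_isSome_get?, h]
      have hv : cd.getD c [] = [a, b] := by simp [PySem.Dict.getD_eq_get?_getD, h]
      have hstep : pvStepA cd x = cd.insert c [a + 1, b + x.2.2.2] := by
        rw [pvStepA_eq_insert]
        unfold pvValA
        rw [hk, if_pos hc, hv]
        simp [PySem.List.pySetD, PySem.List.pySet?, PySem.List.pyGetD,
              PySem.List.pyGet?, PySem.List.pyIdx?]
      have h' : (cd.insert c [a + 1, b + x.2.2.2]).get? c = some [a + 1, b + x.2.2.2] :=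
        PySem.Dict.get?_insert_self _ _ _
      simp only [List.foldl_cons, hstep]
      rw [ih _ _ _ h']
      simp [hk]
      constructor <;> push_cast <;> ring
    · have hstep : (pvStepA cd x).get? c = cd.get? c := by
        rw [pvStepA_eq_insert]
        exact PySem.Dict.get?_insert_of_ne _ _ (Ne.symm hk)
      simp only [List.foldl_cons]
      rw [ih _ _ _ (hstep.trans h)]
      simp [hk]

lemma pvLoopA_get?_none (l : List (String × String × String × Int))
    (cd : PySem.Dict String (List Int)) (c : String)
    (h : cd.get? c = none) :
    (l.foldl pvStepA cd).get? c =
      if c ∈ l.map (fun x => x.2.2.1) then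
        some [((l.filter (fun x => x.2.2.1 == c)).length : Int),
              ((l.filter (fun x => x.2.2.1 == c)).map (·.2.2.2)).sum]
      else none := by
  induction l generalizing cd with
  | nil => simpa using h
  | cons x t ih =>
    by_cases hk : x.2.2.1 = c
    · have hc : cd.contains c = false := by
        simp [PySem.Dict.contains_eq_isSome_get?, h]
      have hstep : pvStepA cd x = cd.insert c [1, x.2.2.2] := by
        rw [pvStepA_eq_insert]
        unfold pvValA
        rw [hk, if_neg (by simp [hc])]
      have h' : (cd.insert c [1, x.2.2.2]).get? c = some [1, x.2.2.2] :=
        PySem.Dict.get?_insert_self _ _ _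
      simp only [List.foldl_cons, hstep]
      rw [pvLoopA_get?_some t _ c 1 x.2.2.2 h']
      simp [hk]
      omega
    · have hstep : (pvStepA cd x).get? c = cd.get? c := by
        rw [pvStepA_eq_insert]
        exact PySem.Dict.get?_insert_of_ne _ _ (Ne.symm hk)
      simp only [List.foldl_cons]
      rw [ih _ (hstep.trans h)]
      have hne : ¬ c = x.2.2.1 := fun e => hk e.symm
      by_cases hm : c ∈ List.map (fun x => x.2.2.1) t <;>
        simp [hm, hne, List.filter_cons, hk]

lemma pvLoopA_keys (l : List (String × String × String × Int)) :
    (l.foldl pvStepA PySem.Dict.empty).keys = PySem.Set.ofList (l.map (fun x => x.2.2.1)) := by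
  rw [pvStepA_funext,
      PySem.Dict.keys_foldl_insert_key (key := fun x => x.2.2.1) (f := pvValA)]
  simp [PySem.Dict.keys_empty, PySem.Set.update_nil_left]

lemma pvLoopA_nodup (l : List (String × String × String × Int)) :
    (l.foldl pvStepA PySem.Dict.empty).keys.Nodup := by
  rw [pvStepA_funext]
  exact PySem.Dict.nodup_keys_foldl_insert_key l _ pvValA _ PySem.Dict.nodup_keys_empty

-- B's grouping fold, characterised
lemma pvGroups_keys (l : List (String × String × String × Int)) :
    (l.foldl (fun d x => d.modify x.2.2.1 [] (· ++ [x.2.2.2]))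
      (PySem.Dict.empty : PySem.Dict String (List Int))).keys =
      PySem.Set.ofList (l.map (fun x => x.2.2.1)) := by
  have h := PySem.Dict.keys_foldl_modify_key l (fun x => x.2.2.1) ([] : List Int)
    (fun _ x v => v ++ [x.2.2.2]) PySem.Dict.empty
  simpa [PySem.Dict.keys_empty, PySem.Set.update_nil_left] using h

lemma pvGroups_nodup (l : List (String × String × String × Int)) :
    (l.foldl (fun d x => d.modify x.2.2.1 [] (· ++ [x.2.2.2]))
      (PySem.Dict.empty : PySem.Dict String (List Int))).keys.Nodup :=
  PySem.Dict.nodup_keys_foldl_modify_key l (fun x => x.2.2.1) ([] : List Int)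
    (fun _ x v => v ++ [x.2.2.2]) PySem.Dict.empty PySem.Dict.nodup_keys_empty

lemma pvGroups_getD (l : List (String × String × String × Int)) (c : String) :
    (l.foldl (fun d x => d.modify x.2.2.1 [] (· ++ [x.2.2.2]))
      (PySem.Dict.empty : PySem.Dict String (List Int))).getD c [] =
      (l.filter (fun x => x.2.2.1 == c)).map (·.2.2.2) := by
  have h : l.foldl (fun d x => d.modify x.2.2.1 [] (· ++ [x.2.2.2]))
      (PySem.Dict.empty : PySem.Dict String (List Int)) =
      (l.map (fun x => (x.2.2.1, x.2.2.2))).foldl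
        (fun d p => d.modify p.1 [] (· ++ [p.2])) PySem.Dict.empty := by
    rw [List.foldl_map]
  rw [h, PySem.Dict.getD_foldl_modify_append]
  simp [List.filter_map, List.map_map, Function.comp_def, PySem.Dict.getD_empty]

-- ===== VERDICT (by name: the statement is the Claim_ definition above) =====
theorem get_points_per_country_spec : Claim_equal_get_points_per_country := by
  intro l _
  unfold Spec_get_points_per_country get_points_per_country get_points_per_country_alt
  rw [PySem.Dict.items_eq_map_keys _ (pvLoopA_nodup l) [], pvLoopA_keys,
      PySem.Dict.items_eq_map_keys _ (pvGroups_nodup l) [], pvGroups_keys, List.map_map]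
  apply List.map_congr_left
  intro c hc
  have hmem : c ∈ l.map (fun x => x.2.2.1) := by
    simpa [PySem.Set.mem_ofList] using hc
  have hget := pvLoopA_get?_none l PySem.Dict.empty c (PySem.Dict.get?_empty c)
  rw [if_pos hmem] at hget
  have hA : (l.foldl pvStepA PySem.Dict.empty).getD c [] =
      [((l.filter (fun x => x.2.2.1 == c)).length : Int),
       ((l.filter (fun x => x.2.2.1 == c)).map (·.2.2.2)).sum] :=
    by simp [PySem.Dict.getD_eq_get?_getD, hget]
  simp [Function.comp_def, hA, pvGroups_getD]
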